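-- pv_equiv track=rewrite | github.com/Henxun/kling-gen | main.py | pick_row_value
-- ===== SOURCE A (Python) =====
-- def normalize_header_name(header_name: str) -> str:
--     '''把表头标准化，便于兼容不同来源的表格文件。'''
--
--     return str(header_name).strip().lower().replace(' ', '').replace('_', '')
--
-- def pick_row_value(row_data: dict[str, str], aliases: list[str]) -> str:
--     '''从一行 CSV 数据中按别名列表提取字段。'''
--
--     normalized_mapping = {
--         normalize_header_name(header_name): str(cell_value).strip()
--         for header_name, cell_value in row_data.items()
--     }
--     for alias in aliases:
--         normalized_alias = normalize_header_name(alias)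
--         if normalized_alias in normalized_mapping:
--             return normalized_mapping[normalized_alias]
--     return ''
-- ===== SOURCE B (Python) =====
-- def normalize_header_name(header_name: str) -> str:
--     return str(header_name).strip().lower().replace(' ', '').replace('_', '')
--
-- def pick_row_value(row_data: dict[str, str], aliases: list[str]) -> str:
--     # Inverted strategy: rank each alias by position (first occurrence of a
--     # normalized form wins), then make a single pass over the row keeping the
--     # best-ranked header; later headers overwrite on equal rank (last-wins).
--     rank = {}
--     for i, a in enumerate(aliases):
--         na = normalize_header_name(a)
--         if na not in rank:
--             rank[na] = i
--     best_rank = len(aliases)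
--     best_value = ''
--     for header_name, cell_value in row_data.items():
--         r = rank.get(normalize_header_name(header_name))
--         if r is not None and r <= best_rank:
--             best_rank = r
--             best_value = str(cell_value).strip()
--     return best_value
-- ===== Notes on version B (the rewrite author's own statement) =====
-- stated objective: alternative
-- what changed: Inverts the loops: instead of building a normalized-header->value dict and probing it alias by alias, B builds an alias->rank dict (first occurrence of a normalized alias wins) and makes a single pass over the row keeping the best-ranked header, with later headers overwriting on equal rank to reproduce the dict comprehension's last-key-wins.
import Mathlib
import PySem

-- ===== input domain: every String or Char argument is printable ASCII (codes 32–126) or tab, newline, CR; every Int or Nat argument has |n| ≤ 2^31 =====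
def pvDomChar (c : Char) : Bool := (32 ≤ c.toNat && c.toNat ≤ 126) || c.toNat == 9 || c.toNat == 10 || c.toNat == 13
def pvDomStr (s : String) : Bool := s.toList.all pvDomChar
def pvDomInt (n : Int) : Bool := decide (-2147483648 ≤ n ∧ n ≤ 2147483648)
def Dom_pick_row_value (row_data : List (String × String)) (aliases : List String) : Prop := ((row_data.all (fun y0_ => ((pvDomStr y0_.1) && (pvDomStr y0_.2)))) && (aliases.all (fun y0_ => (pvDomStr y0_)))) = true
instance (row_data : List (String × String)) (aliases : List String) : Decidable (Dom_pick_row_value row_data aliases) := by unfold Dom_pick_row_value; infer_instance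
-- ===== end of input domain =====

-- B inverts A's loops: instead of building a normalized-header dict and probing it alias by
-- alias, B makes one pass over the row, ranking each header by the position of its normalized
-- form in the normalized alias list and keeping the lowest rank (later headers win ties).

-- ===== PORT A =====
def normalize_header_name (header_name : String) : String :=
  PySem.Str.replace (PySem.Str.replace (PySem.Str.lower (PySem.Str.strip header_name)) " " "") "_" ""

-- the 'for alias in aliases: … return …' loop of A
def pickA_loop (mapping : PySem.Dict String String) : List String → String
  | [] => ""
  | alias_ :: rest =>
    let normalized_alias := normalize_header_name alias_
    if mapping.contains normalized_alias then (mapping.get? normalized_alias).getD ""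
    else pickA_loop mapping rest

def pick_row_value (row_data : List (String × String)) (aliases : List String) : String :=
  let normalized_mapping := row_data.foldl
    (fun d p => d.insert (normalize_header_name p.1) (PySem.Str.strip p.2)) PySem.Dict.empty
  pickA_loop normalized_mapping aliases

-- ===== PORT B =====
-- B-side helpers: the alias→rank dict (first occurrence of a normalized form wins) and the
-- body of B's single row loop (lower rank wins, ties go to later rows)
def rank_of (aliases : List String) : PySem.Dict String Int :=
  (PySem.List.enumerate aliases).foldl
    (fun d q =>
      if d.contains (normalize_header_name q.2) then d
      else d.insert (normalize_header_name q.2) q.1)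
    PySem.Dict.empty

def bstep_alt (rank : PySem.Dict String Int) (acc : Int × String) (p : String × String) : Int × String :=
  match rank.get? (normalize_header_name p.1) with
  | none => acc
  | some r => if r ≤ acc.1 then (r, PySem.Str.strip p.2) else acc

def pick_row_value_alt (row_data : List (String × String)) (aliases : List String) : String :=
  let rank := rank_of aliases
  (row_data.foldl (bstep_alt rank) ((aliases.length : Int), "")).2

-- ===== PRECONDITION & SPEC =====
def Spec_pick_row_value (row_data : List (String × String)) (aliases : List String) (out : String) : Prop := out = pick_row_value_alt row_data aliases
instance (row_data : List (String × String)) (aliases : List String) (out : String) : Decidable (Spec_pick_row_value row_data aliases out) := by unfold Spec_pick_row_value; infer_instance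

-- ===== CLAIM =====
def Claim_equal_pick_row_value : Prop := ∀ (row_data : List (String × String)) (aliases : List String), Dom_pick_row_value row_data aliases → Spec_pick_row_value row_data aliases (pick_row_value row_data aliases)

-- ===== LEMMAS AND PROOFS =====

-- proof-only helpers: last-match scan for one normalized target, alias-outer loop, and the
-- minimum matched alias rank of a row
def pickScan (row_data : List (String × String)) (target : String) : Option String :=
  row_data.foldl
    (fun found p => if normalize_header_name p.1 == target then some (PySem.Str.strip p.2) else found)
    none

def pickOuter (row_data : List (String × String)) : List String → String
  | [] => ""
  | alias_ :: rest =>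
    match pickScan row_data (normalize_header_name alias_) with
    | some v => v
    | none => pickOuter row_data rest

def bstep (norm_aliases : List String) (acc : Nat × String) (p : String × String) : Nat × String :=
  match PySem.List.index? norm_aliases (normalize_header_name p.1) with
  | none => acc
  | some rank => if rank ≤ acc.1 then (rank, PySem.Str.strip p.2) else acc

def mstep (na : List String) (acc : Option Nat) (p : String × String) : Option Nat :=
  match PySem.List.index? na (normalize_header_name p.1) with
  | none => acc
  | some i => match acc with | none => some i | some m => some (min i m)

def minIdx (na : List String) (l : List (String × String)) : Option Nat :=
  l.foldl (mstep na) none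

-- ===== A = pickOuter =====

theorem get?_insert_eq {v_ : Type} (d : PySem.Dict String v_) (a : String) (b : v_) (k : String) :
    (d.insert a b).get? k = if a == k then some b else d.get? k := by
  by_cases h : a = k
  · subst h; simp [PySem.Dict.get?_insert_self]
  · simp [PySem.Dict.get?_insert_of_ne _ _ (Ne.symm h), h]

theorem foldl_get?_eq_scan (l : List (String × String)) (d : PySem.Dict String String) (k : String) :
    (l.foldl (fun d p => d.insert (normalize_header_name p.1) (PySem.Str.strip p.2)) d).get? k
      = l.foldl (fun found p => if normalize_header_name p.1 == k then some (PySem.Str.strip p.2) else found) (d.get? k) := by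
  induction l generalizing d with
  | nil => rfl
  | cons p rest ih =>
    simp only [List.foldl_cons]
    rw [ih, get?_insert_eq]

theorem mapping_get?_eq_scan (row_data : List (String × String)) (k : String) :
    (row_data.foldl (fun d p => d.insert (normalize_header_name p.1) (PySem.Str.strip p.2)) PySem.Dict.empty).get? k
      = pickScan row_data k := by
  rw [foldl_get?_eq_scan]; rfl

theorem contains_eq_isSome {v_ : Type} (d : PySem.Dict String v_) (k : String) :
    d.contains k = (d.get? k).isSome := by
  cases d with
  | mk items =>
    induction items with
    | nil => rfl
    | cons p rest ih =>
      simp [PySem.Dict.contains, PySem.Dict.get?] at *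
      by_cases h : p.1 == k
      · simp [h]
      · simp [h] at ih ⊢; exact ih

theorem pickA_eq_outer (row_data : List (String × String)) (aliases : List String) :
    pick_row_value row_data aliases = pickOuter row_data aliases := by
  induction aliases with
  | nil => rfl
  | cons a rest ih =>
    simp only [pick_row_value, pickA_loop, pickOuter] at *
    rw [contains_eq_isSome, mapping_get?_eq_scan]
    cases h : pickScan row_data (normalize_header_name a) with
    | none => simpa [h] using ih
    | some v => simp

-- ===== facts about index? and minIdx =====

theorem index?_spec {na : List String} {x : String} {i : Nat}
    (h : PySem.List.index? na x = some i) :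
    ∃ hi : i < na.length, na[i] = x ∧ ∀ j (_ : j < i), ¬ na[j] = x := by
  rw [PySem.List.index?_eq_idxOf?] at h
  exact List.idxOf?_eq_some_iff.mp h

theorem minIdx_inv_aux (na : List String) (l : List (String × String)) :
    ∀ acc j, l.foldl (mstep na) acc = some j →
      (∀ j', acc = some j' → ∃ x, PySem.List.index? na x = some j') →
      ∃ x, PySem.List.index? na x = some j := by
  induction l with
  | nil => intro acc j h hacc; exact hacc j h
  | cons p rest ih =>
    intro acc j h hacc
    refine ih (mstep na acc p) j h ?_
    intro j' h'
    unfold mstep at h'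
    cases hidx : PySem.List.index? na (normalize_header_name p.1) with
    | none => rw [hidx] at h'; exact hacc j' h'
    | some i =>
      rw [hidx] at h'
      cases hac : acc with
      | none => rw [hac] at h'; simp at h'; exact ⟨_, h' ▸ hidx⟩
      | some m =>
        rw [hac] at h'; simp at h'
        rcases Nat.le_total i m with hle | hle
        · rw [Nat.min_eq_left hle] at h'; exact ⟨_, h' ▸ hidx⟩
        · rw [Nat.min_eq_right hle] at h'; exact h' ▸ hacc m hac

theorem minIdx_inv {na : List String} {l : List (String × String)} {j : Nat}
    (h : minIdx na l = some j) : ∃ x, PySem.List.index? na x = some j :=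
  minIdx_inv_aux na l none j h (by intro j' h'; cases h')

theorem minIdx_getD {na : List String} {l : List (String × String)} {j : Nat}
    (h : minIdx na l = some j) :
    PySem.List.index? na (na.getD j "") = some j := by
  obtain ⟨x, hx⟩ := minIdx_inv h
  obtain ⟨hi, hget, -⟩ := index?_spec hx
  rwa [List.getD_eq_getElem?_getD, List.getElem?_eq_getElem hi, Option.getD_some, hget]

-- ===== the fold of B computes (min matched rank, last match for it) =====

theorem scan_append (l : List (String × String)) (p : String × String) (s : String) :
    pickScan (l ++ [p]) s
      = if normalize_header_name p.1 == s then some (PySem.Str.strip p.2) else pickScan l s := by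
  simp [pickScan, List.foldl_append]

theorem fold_char (na : List String) (l : List (String × String)) :
    l.foldl (bstep na) (na.length, "") =
      (match minIdx na l with
       | none => (na.length, "")
       | some j => (j, (pickScan l (na.getD j "")).getD "")) := by
  induction l using List.reverseRecOn with
  | nil => rfl
  | append_singleton l p ih =>
    have hmin : minIdx na (l ++ [p]) = mstep na (minIdx na l) p := by
      simp [minIdx, List.foldl_append]
    rw [List.foldl_append, List.foldl_cons, List.foldl_nil, ih, hmin]
    cases hidx : PySem.List.index? na (normalize_header_name p.1) with
    | none =>
      have hnm : normalize_header_name p.1 ∉ na := (PySem.List.index?_eq_none_iff _ _).mp hidx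
      cases hm : minIdx na l with
      | none => unfold bstep mstep; rw [hidx]
      | some j =>
        have hj := minIdx_getD hm
        obtain ⟨hjlt, hget, -⟩ := index?_spec hj
        have hne : ¬ ((normalize_header_name p.1 == na.getD j "") = true) := by
          simp only [beq_iff_eq]
          intro hEq
          exact hnm (hEq ▸ (hget ▸ List.getElem_mem hjlt))
        unfold bstep mstep; rw [hidx]; dsimp only
        rw [scan_append, if_neg hne]
    | some i =>
      obtain ⟨hilt, higet, hifirst⟩ := index?_spec hidx
      have hieq : (normalize_header_name p.1 == na.getD i "") = true := by
        simp only [beq_iff_eq]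
        rw [List.getD_eq_getElem?_getD, List.getElem?_eq_getElem hilt, Option.getD_some, higet]
      cases hm : minIdx na l with
      | none =>
        have hle : i ≤ na.length := Nat.le_of_lt hilt
        unfold bstep mstep; rw [hidx]; dsimp only
        rw [scan_append, if_pos hieq]
        simp [hle]
      | some m =>
        rcases Nat.lt_or_ge m i with hlt | hge
        · -- old minimum m is strictly smaller: acc kept, and p does not match na[m]
          have hj := minIdx_getD hm
          have hne : ¬ ((normalize_header_name p.1 == na.getD m "") = true) := by
            simp only [beq_iff_eq]
            intro hEq
            have hcontr : PySem.List.index? na (normalize_header_name p.1) = some m := hEq ▸ hj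
            rw [hidx] at hcontr
            simp at hcontr
            omega
          have hnotle : ¬ i ≤ m := Nat.not_le.mpr hlt
          unfold bstep mstep; rw [hidx]; dsimp only
          rw [scan_append, Nat.min_eq_right (Nat.le_of_lt hlt), if_neg hne, if_neg hnotle]
        · -- new rank i ≤ m: overwrite
          unfold bstep mstep; rw [hidx]; dsimp only
          rw [scan_append, Nat.min_eq_left hge, if_pos hieq, if_pos hge, Option.getD_some]

-- ===== pickOuter computes the same characterization =====

theorem scan_none_iff (l : List (String × String)) (s : String) :
    ∀ acc, l.foldl
        (fun found p => if normalize_header_name p.1 == s then some (PySem.Str.strip p.2) else found) acc = none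
      ↔ (acc = none ∧ ∀ p ∈ l, normalize_header_name p.1 ≠ s) := by
  induction l with
  | nil => intro acc; simp
  | cons p rest ih =>
    intro acc
    simp only [List.foldl_cons]
    by_cases h : normalize_header_name p.1 = s
    · rw [if_pos (by simp [h] : (normalize_header_name p.1 == s) = true), ih]
      simp [h]
    · rw [if_neg (by simp [h] : ¬ ((normalize_header_name p.1 == s) = true)), ih]
      simp [h]

theorem pickScan_none_iff (l : List (String × String)) (s : String) :
    pickScan l s = none ↔ ∀ p ∈ l, normalize_header_name p.1 ≠ s := by
  unfold pickScan
  rw [scan_none_iff]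
  simp

theorem minIdx_stay_zero (na : List String) (l : List (String × String)) :
    l.foldl (mstep na) (some 0) = some 0 := by
  induction l with
  | nil => rfl
  | cons p rest ih =>
    simp only [List.foldl_cons]
    have : mstep na (some 0) p = some 0 := by
      unfold mstep
      cases PySem.List.index? na (normalize_header_name p.1) with
      | none => rfl
      | some i => simp
    rw [this, ih]

theorem minIdx_reach_zero (s : String) (na : List String) (l : List (String × String))
    (h : ∃ p ∈ l, normalize_header_name p.1 = s) :
    ∀ acc, l.foldl (mstep (s :: na)) acc = some 0 := by
  induction l with
  | nil => simp at h
  | cons p rest ih =>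
    intro acc
    simp only [List.foldl_cons]
    by_cases hp : normalize_header_name p.1 = s
    · have hstep : mstep (s :: na) acc p = some 0 := by
        unfold mstep
        rw [hp, PySem.List.index?_cons_self]
        cases acc <;> simp
      rw [hstep, minIdx_stay_zero]
    · rcases h with ⟨q, hq, hqs⟩
      rcases List.mem_cons.mp hq with rfl | hq'
      · exact absurd hqs hp
      · exact ih ⟨q, hq', hqs⟩ _

theorem minIdx_shift (s : String) (na : List String) (l : List (String × String))
    (h : ∀ p ∈ l, normalize_header_name p.1 ≠ s) :
    ∀ acc, l.foldl (mstep (s :: na)) (acc.map (· + 1)) = (l.foldl (mstep na) acc).map (· + 1) := by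
  induction l with
  | nil => intro acc; rfl
  | cons p rest ih =>
    intro acc
    have hp : normalize_header_name p.1 ≠ s := h p (List.mem_cons_self)
    have hrest : ∀ q ∈ rest, normalize_header_name q.1 ≠ s :=
      fun q hq => h q (List.mem_cons_of_mem _ hq)
    simp only [List.foldl_cons]
    have hstep : mstep (s :: na) (acc.map (· + 1)) p = (mstep na acc p).map (· + 1) := by
      unfold mstep
      rw [PySem.List.index?_cons_of_ne na (fun hEq => hp hEq.symm)]
      cases PySem.List.index? na (normalize_header_name p.1) with
      | none => rfl
      | some i =>
        cases acc with
        | none => rfl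
        | some m => simp [Nat.succ_min_succ]
    rw [hstep, ih hrest]

theorem outer_char (l : List (String × String)) (aliases : List String) :
    pickOuter l aliases =
      (match minIdx (aliases.map normalize_header_name) l with
       | none => ""
       | some j => (pickScan l ((aliases.map normalize_header_name).getD j "")).getD "") := by
  induction aliases with
  | nil =>
    have : minIdx ([] : List String) l = none := by
      unfold minIdx
      induction l with
      | nil => rfl
      | cons p rest ih =>
        simp only [List.foldl_cons]
        have : mstep [] (none : Option Nat) p = none := by
          unfold mstep
          rw [(PySem.List.index?_eq_none_iff ([] : List String) _).mpr (by simp)]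
        rw [this, ih]
    simp [pickOuter, this]
  | cons a rest ih =>
    simp only [List.map_cons, pickOuter]
    cases hscan : pickScan l (normalize_header_name a) with
    | none =>
      have hnone : ∀ p ∈ l, normalize_header_name p.1 ≠ normalize_header_name a :=
        (pickScan_none_iff l _).mp hscan
      have hshift := minIdx_shift (normalize_header_name a) (rest.map normalize_header_name) l hnone none
      simp only [Option.map_none] at hshift
      show pickOuter l rest = _
      rw [ih]
      unfold minIdx
      rw [hshift]
      generalize List.foldl (mstep (List.map normalize_header_name rest)) none l = r
      cases r with
      | none => rfl
      | some j => dsimp only [Option.map_some]; rw [List.getD_cons_succ]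
    | some v =>
      have hex : ∃ p ∈ l, normalize_header_name p.1 = normalize_header_name a := by
        by_contra hc
        rw [not_exists] at hc
        simp only [not_and] at hc
        rw [(pickScan_none_iff l _).mpr hc] at hscan
        cases hscan
      have h0 := minIdx_reach_zero (normalize_header_name a) (rest.map normalize_header_name) l hex none
      unfold minIdx
      rw [h0]
      simp [hscan]

-- ===== the rank dict of B is index? on the normalized alias list =====

theorem rank_aux (l : List String) :
    ∀ (s : Int) (d : PySem.Dict String Int) (x : String),
      ((PySem.List.enumerate l s).foldl
        (fun d q =>
          if d.contains (normalize_header_name q.2) then d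
          else d.insert (normalize_header_name q.2) q.1) d).get? x
      = (match d.get? x with
         | some v => some v
         | none => (PySem.List.index? (l.map normalize_header_name) x).map (fun i => s + (i : Int))) := by
  induction l with
  | nil =>
    intro s d x
    cases hd : d.get? x <;> simp [PySem.List.enumerate, hd]
  | cons a l ih =>
    intro s d x
    rw [PySem.List.enumerate_cons, List.foldl_cons]
    by_cases hc : d.contains (normalize_header_name a) = true
    · rw [if_pos hc, ih]
      cases hd : d.get? x with
      | some v => rfl
      | none =>
        have hxa : normalize_header_name a ≠ x := by
          intro h; rw [← h] at hd
          rw [contains_eq_isSome, hd] at hc; cases hc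
        rw [List.map_cons, PySem.List.index?_cons_of_ne _ hxa]
        cases PySem.List.index? (l.map normalize_header_name) x with
        | none => rfl
        | some i => simp; omega
    · rw [if_neg hc, ih, get?_insert_eq]
      by_cases hxa : normalize_header_name a = x
      · rw [if_pos (by simp [hxa])]
        have hdx : d.get? x = none := by
          rw [contains_eq_isSome] at hc
          rw [← hxa]
          cases h' : d.get? (normalize_header_name a)
          · rfl
          · rw [h'] at hc; cases hc rfl
        rw [hdx, List.map_cons, ← hxa, PySem.List.index?_cons_self]
        simp
      · rw [if_neg (by simp [hxa])]
        cases hd : d.get? x with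
        | some v => rfl
        | none =>
          rw [List.map_cons, PySem.List.index?_cons_of_ne _ hxa]
          cases PySem.List.index? (l.map normalize_header_name) x with
          | none => rfl
          | some i => simp; omega

theorem rank_get? (aliases : List String) (x : String) :
    (rank_of aliases).get? x
      = (PySem.List.index? (aliases.map normalize_header_name) x).map (fun i => (i : Int)) := by
  unfold rank_of
  rw [rank_aux]
  have hempty : (PySem.Dict.empty : PySem.Dict String Int).get? x = none := rfl
  rw [hempty]
  cases PySem.List.index? (aliases.map normalize_header_name) x with
  | none => rfl
  | some i => simp

-- ===== B's Int-ranked fold is the Nat fold over index? =====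

theorem fold_int_eq (na : List String) (rank : PySem.Dict String Int)
    (hr : ∀ x, rank.get? x = (PySem.List.index? na x).map (fun i => (i : Int)))
    (l : List (String × String)) :
    ∀ (k : Nat) (v : String),
      l.foldl (bstep_alt rank) ((k : Int), v)
        = (((l.foldl (bstep na) (k, v)).1 : Int), (l.foldl (bstep na) (k, v)).2) := by
  induction l with
  | nil => intro k v; rfl
  | cons p rest ih =>
    intro k v
    rw [List.foldl_cons, List.foldl_cons]
    have hstep : bstep_alt rank ((k : Int), v) p
        = (((bstep na (k, v) p).1 : Int), (bstep na (k, v) p).2) := by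
      unfold bstep_alt bstep
      rw [hr]
      cases PySem.List.index? na (normalize_header_name p.1) with
      | none => rfl
      | some i =>
        by_cases hik : i ≤ k
        · simp [hik]
        · simp [hik]
    rw [hstep]
    cases bstep na (k, v) p with
    | mk k' v' => exact ih k' v'

theorem alt_eq (row_data : List (String × String)) (aliases : List String) :
    pick_row_value_alt row_data aliases
      = (row_data.foldl (bstep (aliases.map normalize_header_name))
          ((aliases.map normalize_header_name).length, "")).2 := by
  have h1 : pick_row_value_alt row_data aliases
      = (row_data.foldl (bstep_alt (rank_of aliases))
          ((((aliases.map normalize_header_name).length : Nat) : Int), "")).2 := by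
    simp [pick_row_value_alt]
  rw [h1, fold_int_eq _ _ (rank_get? aliases)]

-- ===== combine =====

theorem pick_eq (row_data : List (String × String)) (aliases : List String) :
    pick_row_value row_data aliases = pick_row_value_alt row_data aliases := by
  rw [pickA_eq_outer, outer_char, alt_eq, fold_char]
  cases minIdx (aliases.map normalize_header_name) row_data with
  | none => rfl
  | some j => rfl

-- ===== VERDICT =====
theorem pick_row_value_spec : Claim_equal_pick_row_value := by
  intro row_data aliases _
  exact pick_eq row_data aliases
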